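-- pv_equiv track=rewrite | github.com/miliar/Code_Jam_Webscraper | solutions_python/Problem_155/1206.py | find_min_required_invitees
-- ===== SOURCE A (Python) =====
-- def find_min_required_invitees(audience):
--     current_clappers = 0
--     required_clappers = 0
--
--     for shyness_level, no_of_shy_people in enumerate(audience):
--
--         if shyness_level > current_clappers:
--             required_clappers += shyness_level - current_clappers
--
--         current_clappers += no_of_shy_people + max(0, shyness_level - current_clappers)
--
--     return required_clappers
-- ===== SOURCE B (Python) =====
-- def find_min_required_invitees(audience):
--     # two-pass: pure prefix sums of the audience, then the largest deficit
--     # (shyness level minus people already standing), clamped at 0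
--     prefixes = []
--     total = 0
--     for count in audience:
--         prefixes.append(total)
--         total += count
--     deficits = [s - p for s, p in enumerate(prefixes)]
--     return max([0] + deficits)
-- ===== Notes on version B (the rewrite author's own statement) =====
-- stated objective: simpler
-- what changed: B replaces A's greedy simulation (which folds the invited people back into its standing counter and accumulates the required count conditionally) by a pure prefix-sum pass followed by a clamped max-reduction of the deficits s - prefix[s].
import Mathlib
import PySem

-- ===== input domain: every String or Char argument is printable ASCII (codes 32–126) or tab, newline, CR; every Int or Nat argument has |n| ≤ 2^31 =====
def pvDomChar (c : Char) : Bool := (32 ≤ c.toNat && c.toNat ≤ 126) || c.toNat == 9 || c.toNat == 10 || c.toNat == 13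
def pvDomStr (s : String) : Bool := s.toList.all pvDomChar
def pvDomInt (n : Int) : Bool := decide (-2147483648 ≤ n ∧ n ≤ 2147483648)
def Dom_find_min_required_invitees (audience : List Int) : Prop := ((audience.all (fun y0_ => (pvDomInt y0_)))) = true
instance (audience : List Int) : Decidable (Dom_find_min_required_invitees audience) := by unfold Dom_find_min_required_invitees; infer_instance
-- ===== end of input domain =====

-- B computes the answer as a clamped max-reduction over pure prefix sums instead of A's
-- greedy simulation; proved to return the same value on every input in the domain.
-- ===== PORT A =====
def find_min_required_invitees (audience : List Int) : Int :=
  ((PySem.List.enumerate audience).foldl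
    (fun (st : Int × Int) sc =>
      let required := if sc.1 > st.1 then st.2 + (sc.1 - st.1) else st.2
      (st.1 + sc.2 + max 0 (sc.1 - st.1), required))
    (0, 0)).2

-- ===== PORT B =====
-- the 'for count in audience' loop building the running prefix-sum list, as structural recursion
def fmriPrefixes : List Int -> Int -> List Int
  | [], _ => []
  | count :: rest, total => total :: fmriPrefixes rest (total + count)

def find_min_required_invitees_alt (audience : List Int) : Int :=
  let prefixes := fmriPrefixes audience 0
  let deficits := (PySem.List.enumerate prefixes).map (fun sp => sp.1 - sp.2)
  -- Python's max([0] + deficits) on a nonempty Int list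
  (PySem.List.max? ((0 : Int) :: deficits) (fun x => x)).getD 0

-- ===== PRECONDITION & SPEC =====
def Spec_find_min_required_invitees (audience : List Int) (out : Int) : Prop := out = find_min_required_invitees_alt audience
instance (audience : List Int) (out : Int) : Decidable (Spec_find_min_required_invitees audience out) := by unfold Spec_find_min_required_invitees; infer_instance

-- ===== CLAIM (what is proved, stated in full; the proofs are below) =====
def Claim_equal_find_min_required_invitees : Prop := ∀ (audience : List Int), Dom_find_min_required_invitees audience → Spec_find_min_required_invitees audience (find_min_required_invitees audience)

-- ===== LEMMAS AND PROOFS =====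

-- common reference loop: running max of deficits i - std over the list
def fmriG : List Int -> Int -> Int -> Int -> Int
  | [], _, _, req => req
  | c :: t, i, std, req => fmriG t (i + 1) (std + c) (max req (i - std))

lemma fmriA_eq_g (xs : List Int) : ∀ (i std req : Int),
    ((PySem.List.enumerate xs i).foldl
      (fun (st : Int × Int) sc =>
        let required := if sc.1 > st.1 then st.2 + (sc.1 - st.1) else st.2
        (st.1 + sc.2 + max 0 (sc.1 - st.1), required))
      (std + req, req)).2 = fmriG xs i std req := by
  induction xs with
  | nil => intro i std req; simp [PySem.List.enumerate_nil, fmriG]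
  | cons c t ih =>
    intro i std req
    rw [PySem.List.enumerate_cons, List.foldl_cons]
    have h1 : (if i > std + req then req + (i - (std + req)) else req) = max req (i - std) := by
      split <;> omega
    have h2 : (std + req) + c + max 0 (i - (std + req)) = (std + c) + max req (i - std) := by
      omega
    simp only [h1, h2]
    exact ih (i + 1) (std + c) (max req (i - std))

lemma fmriB_eq_g (xs : List Int) : ∀ (i std req : Int),
    ((PySem.List.enumerate (fmriPrefixes xs std) i).map (fun sp => sp.1 - sp.2)).foldl max req
      = fmriG xs i std req := by
  induction xs with
  | nil => intro i std req; simp [fmriPrefixes, PySem.List.enumerate_nil, fmriG]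
  | cons c t ih =>
    intro i std req
    rw [show fmriPrefixes (c :: t) std = std :: fmriPrefixes t (std + c) from rfl,
        PySem.List.enumerate_cons, List.map_cons, List.foldl_cons]
    exact ih (i + 1) (std + c) (max req (i - std))

-- ===== VERDICT (by name: the statement is the Claim_ definition above) =====
theorem find_min_required_invitees_spec : Claim_equal_find_min_required_invitees := by
  intro audience _
  unfold Spec_find_min_required_invitees find_min_required_invitees find_min_required_invitees_alt
  simp only [PySem.List.max?_id_cons, Option.getD_some]
  have hA := fmriA_eq_g audience 0 0 0
  simp only [add_zero] at hA
  rw [hA]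
  have hB := fmriB_eq_g audience 0 0 0
  rw [← hB]
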